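-- pv_equiv track=rewrite | github.com/Zenglinxiao/OpenNMT-py | onmt/inputters/text_dataset.py | docex2sentexs
-- ===== SOURCE A (Python) =====
-- def docex2sentexs(docex, n_ctxs=2, pad=''):
--     """Convert Doc-like example to sentence examples with contexts."""
--     seqs, idxs = docex
--     sentex = []
--     pad_seqs = [pad] * n_ctxs + seqs
--     for i, idx in enumerate(idxs):
--         ctxs = pad_seqs[i:i+n_ctxs]
--         seq = pad_seqs[i+n_ctxs]
--         sentex.append((seq, ctxs, idx))
--     return sentex
-- ===== SOURCE B (Python) =====
-- def docex2sentexs(docex, n_ctxs=2, pad=''):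
--     """Convert Doc-like example to sentence examples with contexts."""
--     seqs, idxs = docex
--     sentex = []
--     window = [pad] * n_ctxs
--     for i, idx in enumerate(idxs):
--         seq = seqs[i]
--         sentex.append((seq, window, idx))
--         window = (window + [seq])[1:]
--     return sentex
-- ===== Notes on version B (the rewrite author's own statement) =====
-- stated objective: alternative
-- what changed: B walks idxs once maintaining a rolling context window of the last n_ctxs seen sequences (seeded with pads) instead of materialising a padded copy of seqs and slicing it at every position.
import Mathlib
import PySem

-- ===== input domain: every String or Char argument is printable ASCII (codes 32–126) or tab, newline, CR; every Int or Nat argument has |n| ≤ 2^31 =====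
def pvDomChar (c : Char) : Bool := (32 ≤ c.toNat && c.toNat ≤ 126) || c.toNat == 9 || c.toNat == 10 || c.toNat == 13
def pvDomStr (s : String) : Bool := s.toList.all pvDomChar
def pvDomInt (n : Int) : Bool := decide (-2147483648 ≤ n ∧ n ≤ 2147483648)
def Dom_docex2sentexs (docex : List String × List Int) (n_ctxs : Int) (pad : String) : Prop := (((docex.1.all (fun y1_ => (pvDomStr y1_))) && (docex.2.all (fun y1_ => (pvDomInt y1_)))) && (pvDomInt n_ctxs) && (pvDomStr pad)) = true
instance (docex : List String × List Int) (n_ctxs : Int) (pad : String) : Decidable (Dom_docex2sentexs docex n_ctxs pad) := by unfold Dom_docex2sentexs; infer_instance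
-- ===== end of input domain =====

-- B replaces the padded-array-and-slice construction by a single pass with a rolling
-- context window; same cost, different decomposition.

-- ===== PORT A =====
def docex2sentexs (docex : List String × List Int) (n_ctxs : Int) (pad : String) : List (String × List String × Int) :=
  let seqs := docex.1
  let idxs := docex.2
  let pad_seqs := List.replicate n_ctxs.toNat pad ++ seqs
  (PySem.List.enumerate idxs 0).foldl
    (fun sentex p =>
      let ctxs := PySem.List.slice pad_seqs (some p.1) (some (p.1 + n_ctxs))
      -- pad_seqs[i+n_ctxs]: raises (pyGet? = none) outside Pre_; default never reached inside Pre_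
      let seq := PySem.List.pyGetD pad_seqs (p.1 + n_ctxs) ""
      sentex ++ [(seq, ctxs, p.2)]) []

-- ===== PORT B =====
-- loop over idxs with index i and the rolling window, as in Source B
def docex2sentexsAltGo (seqs : List String) : List Int → Nat → List String → List (String × List String × Int)
  | [], _, _ => []
  | idx :: rest, i, window =>
    -- seqs[i]: raises (pyGet? = none) outside Pre_; default never reached inside Pre_
    let seq := (PySem.List.pyGet? seqs (i : Int)).getD ""
    (seq, window, idx) :: docex2sentexsAltGo seqs rest (i + 1) ((window ++ [seq]).drop 1)

def docex2sentexs_alt (docex : List String × List Int) (n_ctxs : Int) (pad : String) : List (String × List String × Int) :=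
  docex2sentexsAltGo docex.1 docex.2 0 (List.replicate n_ctxs.toNat pad)

-- ===== PRECONDITION & SPEC =====
-- Pre_ keeps the natural domain: a non-negative context count (on negative n_ctxs A's
-- values come from accidental negative-index wraparound) and at least as many sequences
-- as indices (otherwise A raises IndexError).
def Pre_docex2sentexs (docex : List String × List Int) (n_ctxs : Int) (pad : String) : Prop :=
  0 ≤ n_ctxs ∧ docex.2.length ≤ docex.1.length
instance (docex : List String × List Int) (n_ctxs : Int) (pad : String) : Decidable (Pre_docex2sentexs docex n_ctxs pad) := by unfold Pre_docex2sentexs; infer_instance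

def pvWitness_docex2sentexs : (List String × List Int) × Int × String := ((["a", "b", "c"], [5, -1, 7]), 2, "<p>")

def Spec_docex2sentexs (docex : List String × List Int) (n_ctxs : Int) (pad : String) (out : List (String × List String × Int)) : Prop := out = docex2sentexs_alt docex n_ctxs pad
instance (docex : List String × List Int) (n_ctxs : Int) (pad : String) (out : List (String × List String × Int)) : Decidable (Spec_docex2sentexs docex n_ctxs pad out) := by unfold Spec_docex2sentexs; infer_instance

-- ===== CLAIM (what is proved, stated in full; the proofs are below) =====
def Claim_equal_docex2sentexs : Prop := ∀ (docex : List String × List Int) (n_ctxs : Int) (pad : String), Dom_docex2sentexs docex n_ctxs pad → Pre_docex2sentexs docex n_ctxs pad → Spec_docex2sentexs docex n_ctxs pad (docex2sentexs docex n_ctxs pad)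

-- ===== LEMMAS AND PROOFS =====

-- rolling-window step: dropping the head of (l.take n ++ [l[n]]) is the next window
lemma window_step {α : Type} (l : List α) (n : Nat) (h : n < l.length) :
    ((l.take n ++ [l[n]]).drop 1) = (l.drop 1).take n := by
  rw [show l.take n ++ [l[n]] = (l.take n).concat l[n] by simp, List.take_concat_get]
  rw [List.drop_take]
  simp

-- A's fold from position s equals B's loop, given the window invariant
lemma go_eq (seqs : List String) (pad : String) (n : Nat)
    (idxs : List Int) : ∀ (s : Nat) (acc : List (String × List String × Int)),
    s + idxs.length ≤ seqs.length →
    (PySem.List.enumerate idxs (s : Int)).foldl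
      (fun sentex p =>
        sentex ++ [(PySem.List.pyGetD (List.replicate n pad ++ seqs) (p.1 + (n : Int)) "",
                    PySem.List.slice (List.replicate n pad ++ seqs) (some p.1) (some (p.1 + (n : Int))),
                    p.2)]) acc
      = acc ++ docex2sentexsAltGo seqs idxs s (((List.replicate n pad ++ seqs).drop s).take n) := by
  induction idxs with
  | nil => intro s acc _; simp [PySem.List.enumerate, docex2sentexsAltGo]
  | cons idx rest ih =>
    intro s acc hlen
    have hs : s < seqs.length := by simp at hlen; omega
    rw [PySem.List.enumerate_cons, List.foldl_cons]
    have hcast : (s : Int) + (n : Int) = ((s + n : Nat) : Int) := by push_cast; ring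
    have hidx : s + n < (List.replicate n pad ++ seqs).length := by
      simp; omega
    have hseq : PySem.List.pyGetD (List.replicate n pad ++ seqs) ((s : Int) + (n : Int)) ""
        = (PySem.List.pyGet? seqs (s : Int)).getD "" := by
      rw [hcast, PySem.List.pyGetD_natCast, PySem.List.pyGet?_natCast]
      rw [List.getD_eq_getElem?_getD]
      rw [List.getElem?_append_right (by simp)]
      simp [hs, Nat.add_comm s n]
    have hslice : PySem.List.slice (List.replicate n pad ++ seqs) (some (s : Int)) (some ((s : Int) + (n : Int)))
        = (((List.replicate n pad ++ seqs)).drop s).take n := by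
      rw [PySem.List.slice_natCast_add]
    have hwin : ((((List.replicate n pad ++ seqs).drop s).take n
          ++ [(PySem.List.pyGet? seqs (s : Int)).getD ""]).drop 1)
        = ((List.replicate n pad ++ seqs).drop (s + 1)).take n := by
      have hlt : n < ((List.replicate n pad ++ seqs).drop s).length := by
        simp; omega
      have hget : ((List.replicate n pad ++ seqs).drop s)[n]'hlt
          = (PySem.List.pyGet? seqs (s : Int)).getD "" := by
        rw [PySem.List.pyGet?_natCast]
        rw [List.getElem_drop]
        rw [List.getElem_append_right (by simp)]
        simp [hs, Nat.add_comm s n]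
      rw [← hget, window_step _ n hlt, List.drop_drop]
    have hrec := ih (s + 1) (acc ++ [((PySem.List.pyGet? seqs (s : Int)).getD "",
        ((List.replicate n pad ++ seqs).drop s).take n, idx)]) (by simp at hlen ⊢; omega)
    push_cast at hrec
    simp only [docex2sentexsAltGo]
    rw [hseq, hslice]
    rw [hrec]
    rw [hwin]
    simp

-- ===== VERDICT (by name: the statement is the Claim_ definition above) =====
theorem docex2sentexs_spec : Claim_equal_docex2sentexs := by
  intro docex n_ctxs pad _ hpre
  obtain ⟨hn, hlen⟩ := hpre
  unfold Spec_docex2sentexs docex2sentexs docex2sentexs_alt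
  have h0 := go_eq docex.1 pad n_ctxs.toNat docex.2 0 [] (by omega)
  simp only [Nat.cast_zero, Int.toNat_of_nonneg hn, List.drop_zero, List.nil_append] at h0
  dsimp only
  rw [h0]
  congr 1
  simp
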